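-- pv_equiv track=rewrite | github.com/akhandsingh17/assignments | codingexercise/LastDuplicateElementSortedArray.py | LastDuplicateElementSortedArray
-- ===== SOURCE A (Python) =====
-- def LastDuplicateElementSortedArray(ary):
--
--     idx=-1
--
--     for i in range(0,len(ary)):
--
--         key=ary[i]
--
--         if key in ary[i+1:] or key in ary[:i]:
--             idx=i
--         else:
--             continue
--
--     return idx
-- ===== SOURCE B (Python) =====
-- def LastDuplicateElementSortedArray(ary):
--     idx = -1
--     seen = []
--     for i in range(len(ary)):
--         x = ary[i]
--         if x in seen:
--             idx = i
--         else:
--             seen.append(x)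
--     return idx
-- ===== Notes on version B (the rewrite author's own statement) =====
-- stated objective: faster
-- what changed: Replaced the per-index two-sided slice scans (ary[i+1:] and ary[:i] rebuilt and searched for every i) by a single forward pass that maintains a list of values seen so far; the last index whose value was already seen is the answer.
import Mathlib
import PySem

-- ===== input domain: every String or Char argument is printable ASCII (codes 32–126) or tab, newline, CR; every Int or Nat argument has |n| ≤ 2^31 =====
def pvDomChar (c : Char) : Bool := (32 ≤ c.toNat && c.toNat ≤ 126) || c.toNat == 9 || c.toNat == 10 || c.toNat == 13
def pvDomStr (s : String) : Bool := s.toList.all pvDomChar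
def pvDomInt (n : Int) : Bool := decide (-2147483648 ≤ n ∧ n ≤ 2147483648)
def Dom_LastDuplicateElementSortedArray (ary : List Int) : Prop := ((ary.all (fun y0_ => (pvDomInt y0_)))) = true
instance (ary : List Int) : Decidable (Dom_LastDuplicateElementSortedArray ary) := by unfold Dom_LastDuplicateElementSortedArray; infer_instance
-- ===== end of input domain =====

-- B replaces A's per-index two-sided slice scans by one forward pass with a list of seen values.
-- ===== PORT A =====
def LastDuplicateElementSortedArray (ary : List Int) : Int :=
  (PySem.List.pyRange 0 (ary.length : Int) 1).foldl
    (fun idx i =>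
      let key := PySem.List.pyGetD ary i 0
      if (PySem.List.slice ary (some (i + 1)) none).contains key
          || (PySem.List.slice ary none (some i)).contains key then i
      else idx)
    (-1)

-- ===== PORT B =====
def LastDuplicateElementSortedArray_alt (ary : List Int) : Int :=
  ((PySem.List.pyRange 0 (ary.length : Int) 1).foldl
    (fun (st : Int × List Int) i =>
      let x := PySem.List.pyGetD ary i 0
      if st.2.contains x then (i, st.2) else (st.1, st.2 ++ [x]))
    (-1, [])).1

-- ===== PRECONDITION & SPEC =====
def Spec_LastDuplicateElementSortedArray (ary : List Int) (out : Int) : Prop := out = LastDuplicateElementSortedArray_alt ary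
instance (ary : List Int) (out : Int) : Decidable (Spec_LastDuplicateElementSortedArray ary out) := by unfold Spec_LastDuplicateElementSortedArray; infer_instance

-- ===== CLAIM =====
def Claim_equal_LastDuplicateElementSortedArray : Prop := ∀ (ary : List Int), Dom_LastDuplicateElementSortedArray ary → Spec_LastDuplicateElementSortedArray ary (LastDuplicateElementSortedArray ary)

-- ===== LEMMAS AND PROOFS =====
-- "last index k < n satisfying c" as a fold over range n (the common shape of both ports)
def pvF (c : Nat → Bool) (n : Nat) : Int :=
  (List.range n).foldl (fun idx k => if c k then (k : Int) else idx) (-1)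

-- A's per-index condition: ary[i] occurs in ary[i+1:] or in ary[:i]
def pvCA (ary : List Int) (k : Nat) : Bool :=
  (ary.drop (k+1)).contains (ary.getD k 0) || (ary.take k).contains (ary.getD k 0)

-- B's per-index condition: ary[i] occurs in ary[:i]
def pvCB (ary : List Int) (k : Nat) : Bool :=
  (ary.take k).contains (ary.getD k 0)

theorem pvF_succ (c : Nat → Bool) (n : Nat) :
    pvF c (n+1) = if c n then (n : Int) else pvF c n := by
  simp [pvF, List.range_succ]

theorem pvF_eq (cA cB : Nat → Bool) :
    ∀ n : Nat, (∀ k, k < n → cB k = true → cA k = true) →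
      (∀ k, k < n → cA k = true → cB k = false → ∃ j, k < j ∧ j < n ∧ cB j = true) →
      pvF cA n = pvF cB n := by
  intro n
  induction n with
  | zero => intro _ _; rfl
  | succ n ih =>
    intro h1 h2
    rw [pvF_succ, pvF_succ]
    by_cases hb : cB n = true
    · rw [hb, h1 n (by omega) hb]
      simp
    · have hbf : cB n = false := by simpa using hb
      by_cases ha : cA n = true
      · obtain ⟨j, hj1, hj2, _⟩ := h2 n (by omega) ha hbf
        omega
      · have haf : cA n = false := by simpa using ha
        rw [haf, hbf]
        simp only [Bool.false_eq_true, if_false]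
        apply ih
        · intro k hk hcb; exact h1 k (by omega) hcb
        · intro k hk hca hcb
          obtain ⟨j, hj1, hj2, hj3⟩ := h2 k (by omega) hca hcb
          refine ⟨j, hj1, ?_, hj3⟩
          rcases Nat.lt_succ_iff_lt_or_eq.mp hj2 with h | h
          · exact h
          · subst h; rw [hbf] at hj3; exact absurd hj3 (by simp)

theorem pvA_eq (ary : List Int) :
    LastDuplicateElementSortedArray ary = pvF (pvCA ary) ary.length := by
  unfold LastDuplicateElementSortedArray pvF
  rw [PySem.List.pyRange_zero_nat, List.foldl_map]
  apply PySem.List.foldl_congr_mem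
  intro idx k _
  have h1 : ((k : Int) + 1) = ((k + 1 : Nat) : Int) := by push_cast; ring
  simp only [PySem.List.pyGetD_natCast, h1, PySem.List.slice_from_natCast,
    PySem.List.slice_to_natCast, pvCA]
  rfl

theorem pvF_congr (c c' : Nat → Bool) (n : Nat)
    (h : ∀ k, k < n → c k = c' k) : pvF c n = pvF c' n := by
  unfold pvF
  apply PySem.List.foldl_congr_mem
  intro idx k hk
  rw [h k (List.mem_range.mp hk)]

-- B's per-index condition before relating "seen" to List.take
def pvCB' (ary : List Int) (k : Nat) : Bool :=
  ((List.range k).map (fun j => ary.getD j 0)).contains (ary.getD k 0)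

theorem pvB_state (ary : List Int) :
    ∀ n : Nat,
      (List.range n).foldl
        (fun (st : Int × List Int) k =>
          if st.2.contains (ary.getD k 0) then ((k : Int), st.2)
          else (st.1, st.2 ++ [ary.getD k 0]))
        (-1, []) = (pvF (pvCB' ary) n,
          PySem.Set.ofList ((List.range n).map (fun k => ary.getD k 0))) := by
  intro n
  induction n with
  | zero => rfl
  | succ n ih =>
    rw [List.range_succ, List.foldl_append, ih, pvF_succ]
    set S := PySem.Set.ofList ((List.range n).map (fun k => ary.getD k 0)) with hS
    have hmem : List.contains S (ary.getD n 0) = pvCB' ary n := by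
      rw [hS]; simp [pvCB', PySem.Set.mem_ofList]
    have hof : PySem.Set.ofList ((List.range n ++ [n]).map (fun k => ary.getD k 0))
        = PySem.Set.add S (ary.getD n 0) := by
      rw [List.map_append, PySem.Set.ofList_eq_foldl,
        List.foldl_append, ← PySem.Set.ofList_eq_foldl, hS]
      rfl
    rw [← hmem, hof]
    simp only [List.foldl_cons, List.foldl_nil, PySem.Set.add]
    cases hc : List.contains S (ary.getD n 0)
    all_goals simp_all [PySem.Set.contains]

theorem pvTake (ary : List Int) (k : Nat) (h : k ≤ ary.length) :
    (List.range k).map (fun j => ary.getD j 0) = ary.take k := by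
  apply List.ext_getElem
  · simp; omega
  · intro j hj1 hj2
    simp only [List.getElem_map, List.getElem_range, List.getElem_take]
    rw [List.getD_eq_getElem?_getD, List.getElem?_eq_getElem (by simp at hj1; omega)]
    rfl

theorem pvCB'_eq (ary : List Int) (k : Nat) (h : k < ary.length) :
    pvCB' ary k = pvCB ary k := by
  unfold pvCB' pvCB
  rw [pvTake ary k (by omega)]

theorem pvB_eq (ary : List Int) :
    LastDuplicateElementSortedArray_alt ary = pvF (pvCB ary) ary.length := by
  unfold LastDuplicateElementSortedArray_alt
  rw [PySem.List.pyRange_zero_nat, List.foldl_map]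
  have hc : ((List.range ary.length).foldl
      (fun (st : Int × List Int) (k : Nat) =>
        let x := PySem.List.pyGetD ary (k : Int) 0
        if st.2.contains x then ((k : Int), st.2) else (st.1, st.2 ++ [x]))
      (-1, [])) = ((List.range ary.length).foldl
      (fun (st : Int × List Int) (k : Nat) =>
        if st.2.contains (ary.getD k 0) then ((k : Int), st.2)
        else (st.1, st.2 ++ [ary.getD k 0]))
      (-1, [])) := by
    apply PySem.List.foldl_congr_mem
    intro st k _
    simp only [PySem.List.pyGetD_natCast]
  rw [hc, pvB_state]
  exact pvF_congr _ _ _ (fun k hk => pvCB'_eq ary k hk)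

theorem pv_h1 (ary : List Int) :
    ∀ k, k < ary.length → pvCB ary k = true → pvCA ary k = true := by
  intro k _ h; simp [pvCA, pvCB] at h ⊢; exact Or.inr h

theorem pv_h2 (ary : List Int) :
    ∀ k, k < ary.length → pvCA ary k = true → pvCB ary k = false →
      ∃ j, k < j ∧ j < ary.length ∧ pvCB ary j = true := by
  intro k hk hA hB
  unfold pvCA at hA
  unfold pvCB at hB
  rw [hB, Bool.or_false] at hA
  have hx : ary.getD k 0 ∈ ary.drop (k+1) := by
    simpa using hA
  obtain ⟨m, hm, hget⟩ := List.mem_iff_getElem.mp hx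
  have hlen : m < ary.length - (k+1) := by simpa using hm
  refine ⟨k+1+m, by omega, by omega, ?_⟩
  unfold pvCB
  have hgk : ary.getD k 0 = ary[k] := by
    rw [List.getD_eq_getElem?_getD, List.getElem?_eq_getElem hk]; rfl
  have hgj : ary.getD (k+1+m) 0 = ary[k+1+m]'(by omega) := by
    rw [List.getD_eq_getElem?_getD, List.getElem?_eq_getElem (by omega)]; rfl
  have hdrop : (ary.drop (k+1))[m] = ary[k+1+m]'(by omega) := by
    rw [List.getElem_drop]
  have hmemt : ary[k] ∈ ary.take (k+1+m) := by
    have : (ary.take (k+1+m))[k]'(by simp; omega) = ary[k] := by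
      simp
    exact this ▸ List.getElem_mem _
  simp only [List.contains_iff_mem]
  rw [hgj, ← hdrop, hget, hgk]
  exact hmemt

-- ===== VERDICT (by name: the statement is the Claim_ definition above) =====
theorem LastDuplicateElementSortedArray_spec : Claim_equal_LastDuplicateElementSortedArray := by
  intro ary _
  unfold Spec_LastDuplicateElementSortedArray
  rw [pvA_eq, pvB_eq]
  exact pvF_eq _ _ _ (pv_h1 ary) (pv_h2 ary)
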